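-- pv_equiv track=rewrite | github.com/CharlotteLuff/gonogo_analysis | gonogo_functions.py | get_rates_data
-- ===== SOURCE A (Python) =====
-- def get_rates_data(results, measure_key, measure_label):
--     y = []
--     conditions = []
--     measures = []
--
--     for condition_name, condition_results in results.items():
--         for animal_id, animal_results in condition_results.items():
--             temp = animal_results[measure_key]
--             y.append(temp)
--             conditions.extend([condition_name])
--             measures.extend([measure_label])
--
--     return y, conditions, measures
-- ===== SOURCE B (Python) =====
-- def get_rates_data(results, measure_key, measure_label):
--     def go(items):
--         if not items:
--             return [], [], []
--         (condition_name, condition_results), rest = items[0], items[1:]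
--         block = [animal_results[measure_key]
--                  for animal_results in condition_results.values()]
--         ys, cs, ms = go(rest)
--         return (block + ys,
--                 [condition_name] * len(block) + cs,
--                 [measure_label] * len(block) + ms)
--     return go(list(results.items()))
-- ===== Notes on version B (the rewrite author's own statement) =====
-- stated objective: alternative
-- what changed: Replaces A's fused iterative loop with per-element appends by a structural recursion over the conditions that builds one per-condition block at a time and combines tuple results by concatenation, with the condition/label columns built as replicated blocks rather than appended element by element.
import Mathlib
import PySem

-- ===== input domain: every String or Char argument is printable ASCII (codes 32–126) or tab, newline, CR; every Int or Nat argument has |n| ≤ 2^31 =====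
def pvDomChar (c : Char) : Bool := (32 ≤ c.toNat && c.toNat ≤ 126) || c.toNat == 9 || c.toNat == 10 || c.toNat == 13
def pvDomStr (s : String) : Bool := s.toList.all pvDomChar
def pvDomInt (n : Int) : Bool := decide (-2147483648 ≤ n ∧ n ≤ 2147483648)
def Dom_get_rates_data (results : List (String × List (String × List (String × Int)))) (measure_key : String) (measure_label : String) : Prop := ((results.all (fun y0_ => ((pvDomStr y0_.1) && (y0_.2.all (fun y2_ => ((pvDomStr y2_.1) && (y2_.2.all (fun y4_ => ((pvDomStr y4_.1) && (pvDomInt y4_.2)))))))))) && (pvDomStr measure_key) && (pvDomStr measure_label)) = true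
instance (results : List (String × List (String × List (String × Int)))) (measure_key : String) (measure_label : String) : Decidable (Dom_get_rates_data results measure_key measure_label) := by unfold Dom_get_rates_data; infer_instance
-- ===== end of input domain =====

-- B replaces A's fused append loop by a structural recursion over the conditions,
-- building per-condition blocks and concatenating tuple results (objective: alternative).
-- Equivalence is about return values.

-- ===== PORT A =====
-- A's fused loop over both dict levels, appending to three accumulators.
-- animal_results[measure_key] raises KeyError when missing; Pre_ excludes that,
-- so the total form getD with dummy default 0 is exact on Pre_.
def get_rates_data (results : List (String × List (String × List (String × Int)))) (measure_key : String) (measure_label : String) : List Int × List String × List String :=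
  results.foldl (fun acc cond =>
    cond.2.foldl (fun acc animal =>
      let temp := (PySem.Dict.mk animal.2).getD measure_key 0
      (acc.1 ++ [temp], acc.2.1 ++ [cond.1], acc.2.2 ++ [measure_label])) acc)
    ([], [], [])

-- ===== PORT B =====
-- Source B's recursive go over the items list: per-condition block comprehension,
-- replicated condition/label blocks, tuple results combined by concatenation.
def grd_go (measure_key measure_label : String) : List (String × List (String × List (String × Int))) → List Int × List String × List String
  | [] => ([], [], [])
  | (condition_name, condition_results) :: rest =>
    let block := condition_results.map (fun animal_results => (PySem.Dict.mk animal_results.2).getD measure_key 0)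
    let r := grd_go measure_key measure_label rest
    (block ++ r.1,
     List.replicate block.length condition_name ++ r.2.1,
     List.replicate block.length measure_label ++ r.2.2)

def get_rates_data_alt (results : List (String × List (String × List (String × Int)))) (measure_key : String) (measure_label : String) : List Int × List String × List String :=
  grd_go measure_key measure_label results

-- ===== PRECONDITION & SPEC =====
-- Pre_ excludes exactly the inputs where A raises KeyError: measure_key must be
-- a key of every animal_results dict.
def Pre_get_rates_data (results : List (String × List (String × List (String × Int)))) (measure_key : String) (measure_label : String) : Prop :=
  ∀ cond ∈ results, ∀ animal ∈ cond.2, measure_key ∈ animal.2.map Prod.fst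
instance (results : List (String × List (String × List (String × Int)))) (measure_key : String) (measure_label : String) : Decidable (Pre_get_rates_data results measure_key measure_label) := by unfold Pre_get_rates_data; infer_instance

def pvWitness_get_rates_data : (List (String × List (String × List (String × Int)))) × String × String :=
  ([("c1", [("a1", [("hit", 1)]), ("a2", [("hit", 2)])]), ("c2", [("a3", [("hit", 3)])])], "hit", "rate")

def Spec_get_rates_data (results : List (String × List (String × List (String × Int)))) (measure_key : String) (measure_label : String) (out : List Int × List String × List String) : Prop := out = get_rates_data_alt results measure_key measure_label
instance (results : List (String × List (String × List (String × Int)))) (measure_key : String) (measure_label : String) (out : List Int × List String × List String) : Decidable (Spec_get_rates_data results measure_key measure_label out) := by unfold Spec_get_rates_data; infer_instance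

-- ===== CLAIM (what is proved, stated in full; the proofs are below) =====
def Claim_equal_get_rates_data : Prop := ∀ (results : List (String × List (String × List (String × Int)))) (measure_key : String) (measure_label : String), Dom_get_rates_data results measure_key measure_label → Pre_get_rates_data results measure_key measure_label → Spec_get_rates_data results measure_key measure_label (get_rates_data results measure_key measure_label)

-- ===== LEMMAS AND PROOFS =====

-- A's inner loop over one condition's animals, from an arbitrary accumulator
theorem grd_inner (l : List (String × List (String × Int))) (mk ml cn : String)
    (acc : List Int × List String × List String) :
    l.foldl (fun acc animal =>
      (acc.1 ++ [(PySem.Dict.mk animal.2).getD mk 0], acc.2.1 ++ [cn], acc.2.2 ++ [ml])) acc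
    = (acc.1 ++ l.map (fun animal => (PySem.Dict.mk animal.2).getD mk 0),
       acc.2.1 ++ List.replicate l.length cn,
       acc.2.2 ++ List.replicate l.length ml) := by
  induction l generalizing acc with
  | nil => simp
  | cons a t ih =>
    simp [List.foldl_cons, ih, List.replicate_succ]

-- A's outer loop, from an arbitrary accumulator, against B's recursion
theorem grd_outer (rs : List (String × List (String × List (String × Int)))) (mk ml : String)
    (acc : List Int × List String × List String) :
    rs.foldl (fun acc cond =>
      cond.2.foldl (fun acc animal =>
        (acc.1 ++ [(PySem.Dict.mk animal.2).getD mk 0], acc.2.1 ++ [cond.1], acc.2.2 ++ [ml])) acc) acc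
    = (acc.1 ++ (grd_go mk ml rs).1,
       acc.2.1 ++ (grd_go mk ml rs).2.1,
       acc.2.2 ++ (grd_go mk ml rs).2.2) := by
  induction rs generalizing acc with
  | nil => simp [grd_go]
  | cons r t ih =>
    rw [List.foldl_cons, grd_inner, ih]
    simp [grd_go, List.append_assoc]

-- ===== VERDICT (by name: the statement is the Claim_ definition above) =====
theorem get_rates_data_spec : Claim_equal_get_rates_data := by
  intro results mk ml _ _
  unfold Spec_get_rates_data get_rates_data get_rates_data_alt
  simpa using grd_outer results mk ml ([], [], [])
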